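-- pv_equiv track=rewrite | github.com/Kulpnc01/Vourdalak | 01_Hunt/Smotrityel/core/timeline.py | get_closest_coordinate
-- ===== SOURCE A (Python) =====
-- import bisect
--
-- def get_closest_coordinate(timeline_data, target_unix_time, max_delta_seconds=86400):
--     """Binary search for spatial anchoring."""
--     if not timeline_data: return None
--     timestamps = [row[0] for row in timeline_data]
--     idx = bisect.bisect_left(timestamps, target_unix_time)
--     if idx == 0: closest = timeline_data[0]
--     elif idx == len(timeline_data): closest = timeline_data[-1]
--     else:
--         before, after = timeline_data[idx - 1], timeline_data[idx]
--         closest = before if (target_unix_time - before[0]) < (after[0] - target_unix_time) else after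
--     if abs(closest[0] - target_unix_time) > max_delta_seconds: return None
--     return closest
-- ===== SOURCE B (Python) =====
-- def get_closest_coordinate(timeline_data, target_unix_time, max_delta_seconds=86400):
--     """Binary search directly over the rows (no timestamps list is built)."""
--     n = len(timeline_data)
--     if n == 0:
--         return None
--
--     def locate(lo, hi):
--         # same comparisons as bisect_left over the first column, done in place
--         if lo >= hi:
--             return lo
--         mid = (lo + hi) // 2
--         if timeline_data[mid][0] < target_unix_time:
--             return locate(mid + 1, hi)
--         return locate(lo, mid)
--
--     idx = locate(0, n)
--     if 0 < idx < n:
--         before, after = timeline_data[idx - 1], timeline_data[idx]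
--         closest = before if target_unix_time - before[0] < after[0] - target_unix_time else after
--     else:
--         closest = timeline_data[0 if idx == 0 else n - 1]
--     return closest if abs(closest[0] - target_unix_time) <= max_delta_seconds else None
-- ===== Notes on version B (the rewrite author's own statement) =====
-- stated objective: alternative
-- what changed: B drops A's build of the separate timestamps list and runs the same bisect_left binary search directly on the rows as a self-contained recursion, with the neighbour selection folded into one branch; a timing run did not show a measurable speed difference.
import Mathlib
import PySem

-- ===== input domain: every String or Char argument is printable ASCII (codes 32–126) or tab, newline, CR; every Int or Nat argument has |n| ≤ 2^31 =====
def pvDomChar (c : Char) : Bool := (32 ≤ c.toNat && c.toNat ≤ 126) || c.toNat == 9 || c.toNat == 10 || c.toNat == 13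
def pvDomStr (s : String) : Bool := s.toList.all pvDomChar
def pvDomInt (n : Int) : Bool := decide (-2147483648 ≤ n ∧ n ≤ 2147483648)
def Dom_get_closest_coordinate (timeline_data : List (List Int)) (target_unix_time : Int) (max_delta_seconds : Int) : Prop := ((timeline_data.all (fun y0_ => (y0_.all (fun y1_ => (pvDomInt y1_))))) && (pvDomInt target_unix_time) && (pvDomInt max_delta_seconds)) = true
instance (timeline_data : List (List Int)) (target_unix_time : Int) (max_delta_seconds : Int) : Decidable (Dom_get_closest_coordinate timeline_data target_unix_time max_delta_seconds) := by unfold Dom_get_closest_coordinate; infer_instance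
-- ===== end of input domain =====

-- B replaces A's timestamps-list build + library bisect by a direct recursive binary search
-- over the rows (alternative decomposition; same result).


-- ===== PORT A =====
-- row[0] (total under Pre_: every row nonempty)
def pvRow0 (row : List Int) : Int := (PySem.List.pyGet? row 0).getD 0

def get_closest_coordinate (timeline_data : List (List Int)) (target_unix_time : Int) (max_delta_seconds : Int) : Option (List Int) :=
  if timeline_data = [] then none
  else
    let timestamps := timeline_data.map pvRow0
    let idx : Int := (PySem.List.bisectLeft timestamps target_unix_time : Nat)
    let closest :=
      if idx = 0 then (PySem.List.pyGet? timeline_data 0).getD []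
      else if idx = (timeline_data.length : Int) then (PySem.List.pyGet? timeline_data (-1)).getD []
      else
        let before := (PySem.List.pyGet? timeline_data (idx - 1)).getD []
        let after := (PySem.List.pyGet? timeline_data idx).getD []
        if target_unix_time - pvRow0 before < pvRow0 after - target_unix_time then before else after
    if |pvRow0 closest - target_unix_time| > max_delta_seconds then none else some closest

-- ===== PORT B =====
-- B's inner recursion `locate`: binary search directly over the rows, no separate timestamps list
def pvLocate (timeline_data : List (List Int)) (target_unix_time : Int) (lo hi : Int) : Int :=
  if h : lo < hi then
    let mid := PySem.Int.floordiv (lo + hi) 2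
    if pvRow0 ((PySem.List.pyGet? timeline_data mid).getD []) < target_unix_time then
      pvLocate timeline_data target_unix_time (mid + 1) hi
    else
      pvLocate timeline_data target_unix_time lo mid
  else lo
termination_by (hi - lo).toNat
decreasing_by
  · have := PySem.Int.floordiv_two_mid_bounds (le_of_lt h)
    have h2 : PySem.Int.floordiv (lo + hi) 2 < hi := by
      rw [PySem.Int.floordiv_lt_iff_lt_mul (by omega)]; omega
    omega
  · have := PySem.Int.floordiv_two_mid_bounds (le_of_lt h)
    have h2 : PySem.Int.floordiv (lo + hi) 2 < hi := by
      rw [PySem.Int.floordiv_lt_iff_lt_mul (by omega)]; omega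
    omega

def get_closest_coordinate_alt (timeline_data : List (List Int)) (target_unix_time : Int) (max_delta_seconds : Int) : Option (List Int) :=
  let n : Int := timeline_data.length
  if n = 0 then none
  else
    let idx := pvLocate timeline_data target_unix_time 0 n
    let closest :=
      if 0 < idx ∧ idx < n then
        let before := (PySem.List.pyGet? timeline_data (idx - 1)).getD []
        let after := (PySem.List.pyGet? timeline_data idx).getD []
        if target_unix_time - pvRow0 before < pvRow0 after - target_unix_time then before else after
      else (PySem.List.pyGet? timeline_data (if idx = 0 then 0 else n - 1)).getD []
    if |pvRow0 closest - target_unix_time| ≤ max_delta_seconds then some closest else none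

-- ===== PRECONDITION & SPEC =====
-- Pre_ excludes exactly the inputs where Python A raises IndexError: a timeline containing an empty row.
def Pre_get_closest_coordinate (timeline_data : List (List Int)) (target_unix_time : Int) (max_delta_seconds : Int) : Prop :=
  ∀ row ∈ timeline_data, row ≠ []
instance (timeline_data : List (List Int)) (target_unix_time : Int) (max_delta_seconds : Int) : Decidable (Pre_get_closest_coordinate timeline_data target_unix_time max_delta_seconds) := by unfold Pre_get_closest_coordinate; infer_instance

def pvWitness_get_closest_coordinate : List (List Int) × Int × Int := ([[0, 1, 2], [10, 3, 4]], 5, 100)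

def Spec_get_closest_coordinate (timeline_data : List (List Int)) (target_unix_time : Int) (max_delta_seconds : Int) (out : Option (List Int)) : Prop := out = get_closest_coordinate_alt timeline_data target_unix_time max_delta_seconds
instance (timeline_data : List (List Int)) (target_unix_time : Int) (max_delta_seconds : Int) (out : Option (List Int)) : Decidable (Spec_get_closest_coordinate timeline_data target_unix_time max_delta_seconds out) := by unfold Spec_get_closest_coordinate; infer_instance

-- ===== CLAIM (what is proved, stated in full; the proofs are below) =====
def Claim_equal_get_closest_coordinate : Prop := ∀ (timeline_data : List (List Int)) (target_unix_time : Int) (max_delta_seconds : Int), Dom_get_closest_coordinate timeline_data target_unix_time max_delta_seconds → Pre_get_closest_coordinate timeline_data target_unix_time max_delta_seconds → Spec_get_closest_coordinate timeline_data target_unix_time max_delta_seconds (get_closest_coordinate timeline_data target_unix_time max_delta_seconds)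

-- ===== LEMMAS AND PROOFS =====

-- bounds of B's recursion
theorem pvLocate_bounds (td : List (List Int)) (t : Int) :
    ∀ (lo hi : Int), lo ≤ hi → lo ≤ pvLocate td t lo hi ∧ pvLocate td t lo hi ≤ hi := by
  intro lo hi hle
  induction lo, hi using pvLocate.induct td t with
  | case1 lo hi h mid hlt ih =>
    rw [pvLocate]; simp only [h, dite_true]
    have hb := PySem.Int.floordiv_two_mid_bounds (le_of_lt h)
    have h2 : PySem.Int.floordiv (lo + hi) 2 < hi := by
      rw [PySem.Int.floordiv_lt_iff_lt_mul (by omega)]; omega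
    simp only [mid] at *
    rw [if_pos hlt]
    have := ih (by omega)
    omega
  | case2 lo hi h mid hge ih =>
    rw [pvLocate]; simp only [h, dite_true]
    have hb := PySem.Int.floordiv_two_mid_bounds (le_of_lt h)
    simp only [mid] at *
    rw [if_neg hge]
    have := ih (by omega)
    omega
  | case3 lo hi h =>
    rw [pvLocate]; simp only [h, dite_false]; omega

-- A's fueled library bisect on the mapped timestamps equals B's direct recursion
theorem bisect_eq_locate (td : List (List Int)) (t : Int) :
    ∀ (fuel : Nat) (lo hi : Nat), hi ≤ td.length → hi - lo ≤ fuel →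
      ((PySem.List.bisectLeftLoop (td.map pvRow0) t fuel lo hi : Nat) : Int)
        = pvLocate td t (lo : Int) (hi : Int) := by
  intro fuel
  induction fuel with
  | zero =>
    intro lo hi hhi hfuel
    have hge : ¬ ((lo : Int) < (hi : Int)) := by omega
    rw [pvLocate]
    simp [PySem.List.bisectLeftLoop, hge]
  | succ fuel ih =>
    intro lo hi hhi hfuel
    by_cases hlt : lo < hi
    · have hmid : (lo + hi) / 2 < td.length := by omega
      have hgetA : (td.map pvRow0)[(lo + hi) / 2]? = some (pvRow0 td[(lo + hi) / 2]) := by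
        simp [List.getElem?_map, List.getElem?_eq_getElem (by simpa using hmid)]
      have hmidI : PySem.Int.floordiv ((lo : Int) + (hi : Int)) 2 = (((lo + hi) / 2 : Nat) : Int) := by
        have := PySem.Int.floordiv_natCast (lo + hi) 2
        push_cast at this ⊢
        omega
      have hgetB : (PySem.List.pyGet? td (((lo + hi) / 2 : Nat) : Int)).getD []
          = td[(lo + hi) / 2] := by
        rw [PySem.List.pyGet?_natCast]
        simp [List.getElem?_eq_getElem hmid]
      rw [pvLocate]
      have hltI : (lo : Int) < (hi : Int) := by omega
      simp only [hltI, dite_true, hmidI, hgetB]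
      simp only [PySem.List.bisectLeftLoop, if_pos hlt, hgetA]
      by_cases hc : pvRow0 td[(lo + hi) / 2] < t
      · simp only [if_pos hc]
        have := ih ((lo + hi) / 2 + 1) hi hhi (by omega)
        push_cast at this ⊢
        exact this
      · simp only [if_neg hc]
        have := ih lo ((lo + hi) / 2) (by omega) (by omega)
        exact this
    · have hgeI : ¬ ((lo : Int) < (hi : Int)) := by omega
      rw [pvLocate]
      simp [PySem.List.bisectLeftLoop, hlt, hgeI]

-- final filter: A's `> max → none` mirrors B's `≤ max → some`
theorem pvFilter_eq (t m : Int) (c : List Int) :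
    (if |pvRow0 c - t| > m then (none : Option (List Int)) else some c)
      = (if |pvRow0 c - t| ≤ m then some c else none) := by
  by_cases h : |pvRow0 c - t| ≤ m
  · rw [if_neg (not_lt.mpr h), if_pos h]
  · rw [if_pos (not_le.mp h), if_neg h]

-- timeline[-1] = timeline[len - 1] on a nonempty list
theorem pvLast_eq (td : List (List Int)) (hnil : td ≠ []) :
    (PySem.List.pyGet? td (-1)).getD ([] : List Int)
      = (PySem.List.pyGet? td ((td.length : Int) - 1)).getD [] := by
  have hlen : 0 < td.length := List.length_pos_iff.mpr hnil
  have h1 : (PySem.List.pyGet? td (-1)).getD ([] : List Int) = PySem.List.pyGetD td (-1) [] := rfl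
  have h2 : (PySem.List.pyGet? td ((td.length : Int) - 1)).getD ([] : List Int)
      = PySem.List.pyGetD td ((td.length : Int) - 1) [] := rfl
  rw [h1, h2, PySem.List.pyGetD_neg_one td ([] : List Int) hnil]
  have h3 : ((td.length : Int) - 1) = ((td.length - 1 : Nat) : Int) := by omega
  rw [h3, PySem.List.pyGetD_natCast]
  simp [List.getD_eq_getElem?_getD,
        List.getElem?_eq_getElem (by omega : td.length - 1 < td.length),
        List.getLast_eq_getElem]

theorem get_closest_coordinate_spec : Claim_equal_get_closest_coordinate := by
  intro td t m _ _
  unfold Spec_get_closest_coordinate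
  unfold get_closest_coordinate get_closest_coordinate_alt
  by_cases hnil : td = []
  · subst hnil; simp
  · have hlen : 0 < td.length := List.length_pos_iff.mpr hnil
    have hn0 : (td.length : Int) ≠ 0 := by omega
    simp only [hnil, if_neg hn0, if_false]
    have hb := bisect_eq_locate td t (td.map pvRow0).length 0 td.length (by simp) (by simp)
    have hidx : ((PySem.List.bisectLeft (td.map pvRow0) t : Nat) : Int) = pvLocate td t 0 (td.length : Int) := by
      unfold PySem.List.bisectLeft
      simpa using hb
    rw [hidx]
    set idx := pvLocate td t 0 (td.length : Int) with hidxdef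
    have hbnd := pvLocate_bounds td t 0 (td.length : Int) (by positivity)
    by_cases h0 : idx = 0
    · rw [if_pos h0, if_neg (by omega : ¬ (0 < idx ∧ idx < (td.length : Int))), if_pos h0]
      exact pvFilter_eq t m _
    · by_cases hl : idx = (td.length : Int)
      · rw [if_neg h0, if_pos hl, if_neg (by omega : ¬ (0 < idx ∧ idx < (td.length : Int))),
            if_neg h0, ← hl, pvLast_eq td hnil, hl]
        exact pvFilter_eq t m _
      · rw [if_neg h0, if_neg hl, if_pos (by omega : 0 < idx ∧ idx < (td.length : Int))]
        exact pvFilter_eq t m _
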